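-- pv_equiv track=rewrite | github.com/Lirioth/Fullstack2026 | Week1Python/Day4Functions/Exercises/ExercisesXPNinja/xp_ninja_functions_single.py | _cap_hyphen_apostrophe
-- ===== SOURCE A (Python) =====
-- def _cap_hyphen_apostrophe(token: str) -> str:
--     """Capitalize a single token that may include hyphens or apostrophes.
--     Example: "o'connor-smith" -> "O'Connor-Smith"
--     """
--     if not token:
--         return token
--     parts_hyphen = token.split('-')
--     def cap_apostrophe(part: str) -> str:
--         parts_ap = part.split("'")
--         return "'".join(p.capitalize() if p else p for p in parts_ap)
--     return '-'.join(cap_apostrophe(p) for p in parts_hyphen)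
-- ===== SOURCE B (Python) =====
-- def _cap_hyphen_apostrophe(token: str) -> str:
--     # Single left-to-right scan: a flag marks the start of each segment;
--     # '-' and "'" pass through and restart a segment.
--     out = []
--     start = True
--     for ch in token:
--         if ch == '-' or ch == "'":
--             out.append(ch)
--             start = True
--         elif start:
--             out.append(ch.upper())
--             start = False
--         else:
--             out.append(ch.lower())
--     return ''.join(out)
-- ===== Notes on version B (the rewrite author's own statement) =====
-- stated objective: alternative
-- what changed: Replaces the nested split-on-'-'/split-on-apostrophe + per-piece capitalize + double join with a single left-to-right character scan that carries a start-of-segment flag (uppercase the first character after a delimiter, lowercase the rest, delimiters pass through).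
import Mathlib
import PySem

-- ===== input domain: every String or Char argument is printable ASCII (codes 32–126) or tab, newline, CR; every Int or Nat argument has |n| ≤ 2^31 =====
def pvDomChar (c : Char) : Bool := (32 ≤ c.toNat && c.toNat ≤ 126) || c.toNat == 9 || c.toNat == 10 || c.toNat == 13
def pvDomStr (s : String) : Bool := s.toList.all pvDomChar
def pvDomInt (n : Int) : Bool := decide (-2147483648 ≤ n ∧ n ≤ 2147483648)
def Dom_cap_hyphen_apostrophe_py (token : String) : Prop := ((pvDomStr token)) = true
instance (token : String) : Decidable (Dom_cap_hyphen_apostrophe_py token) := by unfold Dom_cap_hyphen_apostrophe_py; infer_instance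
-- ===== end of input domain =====

-- B replaces A's nested split/capitalize/join passes by a single character scan with a
-- start-of-segment flag; equivalence is proved on the printable-ASCII domain Dom.


-- ===== PORT A =====
-- str.capitalize, ported by hand: first char upper, rest lower (exact on the ASCII domain)
def pyCapitalize (cs : List Char) : List Char :=
  match cs with
  | [] => []
  | c :: rest => PySem.Chars.upperChar c :: PySem.Chars.lower rest

-- A's inner helper cap_apostrophe: split on "'", capitalize non-empty pieces, rejoin
def capApostrophe (part : List Char) : List Char :=
  PySem.Chars.join ['\''] ((PySem.Chars.splitOn part ['\'']).map
    (fun p => if p = [] then p else pyCapitalize p))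

def cap_hyphen_apostrophe_py (token : String) : String :=
  if token = "" then token
  else String.ofList (PySem.Chars.join ['-'] ((PySem.Chars.splitOn token.toList ['-']).map capApostrophe))

-- ===== PORT B =====
-- single scan with a start-of-segment flag (Source B's loop)
def altScan (start : Bool) (cs : List Char) : List Char :=
  match cs with
  | [] => []
  | c :: rest =>
    if c = '-' || c = '\'' then c :: altScan true rest
    else if start then PySem.Chars.upperChar c :: altScan false rest
    else PySem.Chars.lowerChar c :: altScan false rest

def cap_hyphen_apostrophe_py_alt (token : String) : String :=
  String.ofList (altScan true token.toList)

-- ===== PRECONDITION & SPEC =====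
def Spec_cap_hyphen_apostrophe_py (token : String) (out : String) : Prop := out = cap_hyphen_apostrophe_py_alt token
instance (token : String) (out : String) : Decidable (Spec_cap_hyphen_apostrophe_py token out) := by unfold Spec_cap_hyphen_apostrophe_py; infer_instance

-- ===== CLAIM (what is proved, stated in full; the proofs are below) =====
def Claim_equal_cap_hyphen_apostrophe_py : Prop := ∀ (token : String), Dom_cap_hyphen_apostrophe_py token → Spec_cap_hyphen_apostrophe_py token (cap_hyphen_apostrophe_py token)

-- ===== LEMMAS AND PROOFS =====

-- structural counterpart of Python's str.split(d) for a one-char separator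
def mySplit (d : Char) (pre : List Char) : List Char → List (List Char)
  | [] => [pre]
  | c :: rest => if c = d then pre :: mySplit d [] rest else mySplit d (pre ++ [c]) rest

lemma go_eq (d : Char) : ∀ (l : List Char) (fuel : Nat) (cur : List Char) (acc : List (List Char)),
    l.length ≤ fuel →
    PySem.Chars.splitOn.go [d] fuel l cur acc = acc.reverse ++ mySplit d cur.reverse l := by
  intro l
  induction l with
  | nil =>
    intro fuel cur acc _
    cases fuel <;> rw [PySem.Chars.splitOn.go] <;> simp [mySplit]
  | cons c rest ih =>
    intro fuel cur acc hle
    match fuel with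
    | 0 => simp at hle
    | f + 1 =>
      rw [PySem.Chars.splitOn.go]
      by_cases hc : d = c
      · subst hc
        simp only [List.isPrefixOf, Bool.and_true, beq_self_eq_true, if_pos, List.length_cons,
          List.drop_succ_cons, List.length_nil, List.drop_zero]
        rw [ih f [] (cur.reverse :: acc) (by simpa using hle)]
        simp [mySplit]
      · have hpre : [d].isPrefixOf (c :: rest) = false := by
          simp [List.isPrefixOf, hc]
        rw [hpre]
        simp only [Bool.false_eq_true, if_false]
        rw [ih f (c :: cur) acc (by simpa using hle)]
        have hcd : ¬ (c = d) := fun h => hc h.symm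
        simp [mySplit, hcd]

lemma splitOn_eq_mySplit (d : Char) (cs : List Char) :
    PySem.Chars.splitOn cs [d] = mySplit d [] cs := by
  unfold PySem.Chars.splitOn
  rw [go_eq d cs (cs.length + 1) [] [] (by omega)]
  simp

lemma mySplit_spec (d : Char) (cs : List Char) :
    ∃ h t, mySplit d [] cs = h :: t ∧ ∀ pre, mySplit d pre cs = (pre ++ h) :: t := by
  induction cs with
  | nil => exact ⟨[], [], by simp [mySplit], fun pre => by simp [mySplit]⟩
  | cons c rest ih =>
    obtain ⟨h, t, e1, e2⟩ := ih
    by_cases hc : c = d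
    · exact ⟨[], mySplit d [] rest, by simp [mySplit, hc],
        fun pre => by simp [mySplit, hc]⟩
    · refine ⟨c :: h, t, ?_, fun pre => ?_⟩
      · show mySplit d [] (c :: rest) = (c :: h) :: t
        simp only [mySplit, hc, if_false]
        simpa using e2 [c]
      · simp only [mySplit, hc, if_false]
        rw [e2 (pre ++ [c])]
        simp

lemma join_head_cons (sep : List Char) (x : Char) (p : List Char) (ps : List (List Char)) :
    PySem.Chars.join sep ((x :: p) :: ps) = x :: PySem.Chars.join sep (p :: ps) := by
  cases ps with
  | nil => simp [PySem.Chars.join_singleton]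
  | cons q qs => rw [PySem.Chars.join_cons_cons, PySem.Chars.join_cons_cons]; simp

-- A's processing of the tail of a hyphen-piece whose first apostrophe-piece is already started
def capLowerFirst (p : List Char) : List Char :=
  match mySplit '\'' [] p with
  | [] => []
  | h0 :: t0 => PySem.Chars.join ['\''] (PySem.Chars.lower h0 ::
      t0.map (fun q => if q = [] then q else pyCapitalize q))

-- A's processing of the tail of the token when the current segment is already started
def Tjoin (cs : List Char) : List Char :=
  match mySplit '-' [] cs with
  | [] => []
  | h :: t => PySem.Chars.join ['-'] (capLowerFirst h :: t.map capApostrophe)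

lemma Tjoin_eq (cs h : List Char) (t : List (List Char)) (e : mySplit '-' [] cs = h :: t) :
    Tjoin cs = PySem.Chars.join ['-'] (capLowerFirst h :: t.map capApostrophe) := by
  unfold Tjoin; rw [e]

lemma capAp_mySplit (p : List Char) :
    capApostrophe p = PySem.Chars.join ['\''] ((mySplit '\'' [] p).map
      (fun q => if q = [] then q else pyCapitalize q)) := by
  unfold capApostrophe; rw [splitOn_eq_mySplit]

lemma capAp_apos (h : List Char) : capApostrophe ('\'' :: h) = '\'' :: capApostrophe h := by
  obtain ⟨h0, t0, e1, _⟩ := mySplit_spec '\'' h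
  rw [capAp_mySplit, capAp_mySplit]
  have : mySplit '\'' [] ('\'' :: h) = [] :: mySplit '\'' [] h := by simp [mySplit]
  rw [this, e1]
  rw [List.map_cons, List.map_cons]
  rw [PySem.Chars.join_cons_cons]
  simp

lemma capLF_apos (h : List Char) : capLowerFirst ('\'' :: h) = '\'' :: capApostrophe h := by
  obtain ⟨h0, t0, e1, _⟩ := mySplit_spec '\'' h
  unfold capLowerFirst
  have : mySplit '\'' [] ('\'' :: h) = [] :: mySplit '\'' [] h := by simp [mySplit]
  rw [this, e1]
  rw [capAp_mySplit, e1]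
  simp only [List.map_cons]
  rw [PySem.Chars.join_cons_cons]
  simp [PySem.Chars.lower]

lemma capAp_cons (c : Char) (hc : c ≠ '\'') (h : List Char) :
    capApostrophe (c :: h) = PySem.Chars.upperChar c :: capLowerFirst h := by
  obtain ⟨h0, t0, e1, e2⟩ := mySplit_spec '\'' h
  rw [capAp_mySplit]
  have : mySplit '\'' [] (c :: h) = (c :: h0) :: t0 := by
    simp only [mySplit, hc, if_false]
    simpa using e2 [c]
  rw [this, List.map_cons]
  have hne : ¬ (c :: h0 = ([] : List Char)) := by simp
  simp only [hne, if_false]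
  show PySem.Chars.join ['\''] ((PySem.Chars.upperChar c :: PySem.Chars.lower h0) :: _) = _
  rw [join_head_cons]
  unfold capLowerFirst
  rw [e1]

lemma capLF_cons (c : Char) (hc : c ≠ '\'') (h : List Char) :
    capLowerFirst (c :: h) = PySem.Chars.lowerChar c :: capLowerFirst h := by
  obtain ⟨h0, t0, e1, e2⟩ := mySplit_spec '\'' h
  unfold capLowerFirst
  have : mySplit '\'' [] (c :: h) = (c :: h0) :: t0 := by
    simp only [mySplit, hc, if_false]
    simpa using e2 [c]
  rw [this, e1]
  show PySem.Chars.join ['\''] ((PySem.Chars.lowerChar c :: PySem.Chars.lower h0) :: _) = _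
  rw [join_head_cons]

lemma main_scan (cs : List Char) :
    PySem.Chars.join ['-'] ((mySplit '-' [] cs).map capApostrophe) = altScan true cs ∧
    Tjoin cs = altScan false cs := by
  induction cs with
  | nil =>
    constructor
    · simp [mySplit, PySem.Chars.join_singleton, capAp_mySplit, pyCapitalize, altScan]
    · simp [Tjoin, mySplit, capLowerFirst, PySem.Chars.join_singleton, altScan,
        PySem.Chars.lower]
  | cons c rest ih =>
    obtain ⟨ihS, ihT⟩ := ih
    obtain ⟨h, t, e1, e2⟩ := mySplit_spec '-' rest
    by_cases h1 : c = '-'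
    · subst h1
      have hsp : mySplit '-' [] ('-' :: rest) = [] :: h :: t := by simp [mySplit, e1]
      have hAp : capApostrophe [] = [] := by
        simp [capAp_mySplit, mySplit, PySem.Chars.join_singleton]
      have hLF : capLowerFirst [] = [] := by
        simp [capLowerFirst, mySplit, PySem.Chars.join_singleton, PySem.Chars.lower]
      constructor
      · rw [hsp, List.map_cons, List.map_cons, hAp, PySem.Chars.join_cons_cons]
        rw [e1, List.map_cons] at ihS
        simp [altScan, ihS]
      · rw [Tjoin_eq _ _ _ hsp, hLF, List.map_cons, PySem.Chars.join_cons_cons]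
        rw [e1, List.map_cons] at ihS
        simp [altScan, ihS]
    · have hsp : mySplit '-' [] (c :: rest) = (c :: h) :: t := by
        simp only [mySplit, h1, if_false]
        simpa using e2 [c]
      by_cases h2 : c = '\''
      · subst h2
        constructor
        · rw [hsp, List.map_cons, capAp_apos, join_head_cons]
          rw [e1, List.map_cons] at ihS
          simp [altScan, ihS]
        · rw [Tjoin_eq _ _ _ hsp, capLF_apos, join_head_cons]
          rw [e1, List.map_cons] at ihS
          simp [altScan, ihS]
      · constructor
        · rw [hsp, List.map_cons, capAp_cons c h2, join_head_cons]
          rw [Tjoin_eq _ _ _ e1] at ihT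
          simp [altScan, h1, h2, ihT]
        · rw [Tjoin_eq _ _ _ hsp, capLF_cons c h2, join_head_cons]
          rw [Tjoin_eq _ _ _ e1] at ihT
          simp [altScan, h1, h2, ihT]

-- ===== VERDICT (by name: the statement is the Claim_ definition above) =====
theorem cap_hyphen_apostrophe_py_spec : Claim_equal_cap_hyphen_apostrophe_py := by
  intro token _
  unfold Spec_cap_hyphen_apostrophe_py cap_hyphen_apostrophe_py cap_hyphen_apostrophe_py_alt
  by_cases he : token = ""
  · subst he; decide
  · rw [if_neg he, splitOn_eq_mySplit]
    exact congrArg String.ofList (main_scan token.toList).1
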